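-- pv_equiv track=rewrite | github.com/TNSGayathri/GreeksforGreeks | Medium/Construct list using given q XOR queries/construct-list-using-given-q-xor-queries.py | constructList
-- ===== SOURCE A (Python) =====
-- from typing import List
--
-- def constructList(q: int, queries: List[List[int]]) -> List[int]:
--     l = [0]
--     current_xor = 0
--
--     for query in queries:
--         if query[0] == 0:
--             l.append(query[1] ^ current_xor)
--         else:
--             current_xor ^= query[1]
--     for i in range(len(l)):
--         l[i] ^= current_xor
--
--     l.sort()
--     return l
-- ===== SOURCE B (Python) =====
-- from typing import List
--
-- def constructList(q: int, queries: List[List[int]]) -> List[int]: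
--     # Precompute the suffix-XOR table of the type-1 values (suf[i] = XOR of
--     # type-1 values among queries[i:]), then pick the type-0 values in one
--     # zip comprehension; no element is ever rewritten after being emitted.
--     suf = [0]
--     for query in reversed(queries):
--         suf.append(suf[-1] ^ (query[1] if query[0] != 0 else 0))
--     suf.reverse()
--     out = [query[1] ^ s for query, s in zip(queries, suf[1:]) if query[0] == 0]
--     out.append(suf[0])
--     return sorted(out)
-- ===== Notes on version B (the rewrite author's own statement) =====
-- stated objective: alternative
-- what changed: B precomputes a suffix-XOR table of the type-1 values and emits each type-0 element in final form via one zip comprehension, instead of A's grow-while-scanning list plus a second whole-list XOR fixup loop.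
import Mathlib
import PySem

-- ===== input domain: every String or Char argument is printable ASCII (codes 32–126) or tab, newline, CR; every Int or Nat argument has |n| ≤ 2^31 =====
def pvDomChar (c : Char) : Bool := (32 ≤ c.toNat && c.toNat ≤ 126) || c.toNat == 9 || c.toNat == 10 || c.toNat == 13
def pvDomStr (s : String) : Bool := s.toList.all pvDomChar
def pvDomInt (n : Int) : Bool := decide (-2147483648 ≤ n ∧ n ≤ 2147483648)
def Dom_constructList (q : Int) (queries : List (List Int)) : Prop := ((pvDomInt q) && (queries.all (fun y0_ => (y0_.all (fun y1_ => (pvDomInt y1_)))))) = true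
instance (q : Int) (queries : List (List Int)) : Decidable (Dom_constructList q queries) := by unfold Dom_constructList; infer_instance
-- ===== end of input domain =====

-- B precomputes a suffix-XOR table of the type-1 values and emits each type-0 element
-- already in final form via one zip comprehension, instead of A's grow-while-scanning
-- list plus a second whole-list XOR fixup loop (alternative decomposition, same cost).

-- ===== PORT A =====
-- forward foldl over queries carrying (l, current_xor); then 'for i in range(len(l)): l[i] ^= current_xor'; then l.sort()
def constructList (q : Int) (queries : List (List Int)) : List Int :=
  let st := queries.foldl
    (fun (st : List Int × Int) query =>
      if PySem.List.pyGetD query 0 0 = 0 then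
        (st.1 ++ [PySem.Int.bxor (PySem.List.pyGetD query 1 0) st.2], st.2)
      else
        (st.1, PySem.Int.bxor st.2 (PySem.List.pyGetD query 1 0)))
    ([0], 0)
  let l := st.1.map (fun x => PySem.Int.bxor x st.2)
  PySem.List.sorted l (fun x => x) false

-- ===== PORT B =====
-- 'for query in reversed(queries): suf.append(suf[-1] ^ (query[1] if query[0] != 0 else 0))'
-- then 'suf.reverse()': appending while walking the reversed list and reversing at the end
-- is the structural cons-recursion below, producing suf in its final order (suf[n] = 0).
def sufB : List (List Int) → List Int
  | [] => [0]
  | query :: rest =>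
      PySem.Int.bxor (sufB rest).headI
        (if PySem.List.pyGetD query 0 0 ≠ 0 then PySem.List.pyGetD query 1 0 else 0)
        :: sufB rest

-- the zip comprehension is List.zip + filterMap; 'out.append(suf[0]); return sorted(out)'
def constructList_alt (q : Int) (queries : List (List Int)) : List Int :=
  let suf := sufB queries
  let out := (queries.zip suf.tail).filterMap
    (fun p =>
      if PySem.List.pyGetD p.1 0 0 = 0 then
        some (PySem.Int.bxor (PySem.List.pyGetD p.1 1 0) p.2)
      else none)
  PySem.List.sorted (out ++ [suf.headI]) (fun x : Int => x) false

-- ===== PRECONDITION & SPEC =====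
-- A indexes query[0] and query[1] of every query: a query shorter than 2 raises IndexError (B raises there too).
def Pre_constructList (q : Int) (queries : List (List Int)) : Prop :=
  ∀ query ∈ queries, 2 ≤ query.length
instance (q : Int) (queries : List (List Int)) : Decidable (Pre_constructList q queries) := by unfold Pre_constructList; infer_instance

def pvWitness_constructList : Int × List (List Int) := (2, [[0, 3], [1, 2], [0, 5]])

def Spec_constructList (q : Int) (queries : List (List Int)) (out : List Int) : Prop := out = constructList_alt q queries
instance (q : Int) (queries : List (List Int)) (out : List Int) : Decidable (Spec_constructList q queries out) := by unfold Spec_constructList; infer_instance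

-- ===== CLAIM (what is proved, stated in full; the proofs are below) =====
def Claim_equal_constructList : Prop := ∀ (q : Int) (queries : List (List Int)), Dom_constructList q queries → Pre_constructList q queries → Spec_constructList q queries (constructList q queries)

-- ===== LEMMAS AND PROOFS =====

theorem bxor_eq_xor (a b : Int) : PySem.Int.bxor a b = Int.xor a b := by
  rcases a with m | m <;> rcases b with n | n <;>
    simp [PySem.Int.bxor, Int.xor, Int.negSucc_eq] <;> ring_nf <;> omega

theorem bxor_assoc (a b c : Int) :
    PySem.Int.bxor (PySem.Int.bxor a b) c = PySem.Int.bxor a (PySem.Int.bxor b c) := by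
  rcases a with m | m <;> rcases b with n | n <;> rcases c with k | k <;>
    simp [bxor_eq_xor, Int.xor, Nat.xor_assoc]

theorem bxor_zero_left (b : Int) : PySem.Int.bxor 0 b = b := by
  rw [PySem.Int.bxor_comm, PySem.Int.bxor_zero]

theorem bxor_cancel (a c b : Int) :
    PySem.Int.bxor (PySem.Int.bxor a c) (PySem.Int.bxor c b) = PySem.Int.bxor a b := by
  rw [bxor_assoc, ← bxor_assoc c c b, PySem.Int.bxor_self, bxor_zero_left]

-- specification values: the final current_xor (sufT) and, for each type-0 query,
-- its value XORed with the suffix XOR of the type-1 queries after it (sufVals)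
def sufT : List (List Int) → Int
  | [] => 0
  | query :: rest =>
      if PySem.List.pyGetD query 0 0 = 0 then sufT rest
      else PySem.Int.bxor (sufT rest) (PySem.List.pyGetD query 1 0)

def sufVals : List (List Int) → List Int
  | [] => []
  | query :: rest =>
      if PySem.List.pyGetD query 0 0 = 0 then
        PySem.Int.bxor (PySem.List.pyGetD query 1 0) (sufT rest) :: sufVals rest
      else sufVals rest

-- B's suffix table computes sufT at every position
theorem sufB_headI (queries : List (List Int)) : (sufB queries).headI = sufT queries := by
  induction queries with
  | nil => rfl
  | cons query rest ih =>
      by_cases h : PySem.List.pyGetD query 0 0 = 0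
      · simp only [sufB, sufT, List.headI_cons, ih, if_neg (not_not_intro h), if_pos h,
          PySem.Int.bxor_zero]
      · simp only [sufB, sufT, List.headI_cons, ih, if_pos h, if_neg h]

theorem sufB_decomp (queries : List (List Int)) :
    sufB queries = (sufB queries).headI :: (sufB queries).tail := by
  cases queries <;> rfl

-- B's zip comprehension computes sufVals
theorem zipValsB (queries : List (List Int)) :
    ((queries.zip (sufB queries).tail).filterMap
      (fun p =>
        if PySem.List.pyGetD p.1 0 0 = 0 then
          some (PySem.Int.bxor (PySem.List.pyGetD p.1 1 0) p.2)
        else none)) = sufVals queries := by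
  induction queries with
  | nil => rfl
  | cons query rest ih =>
      have htail : (sufB (query :: rest)).tail = sufB rest := rfl
      rw [htail, sufB_decomp rest, List.zip_cons_cons, List.filterMap_cons]
      by_cases h : PySem.List.pyGetD query 0 0 = 0
      · simp [h, sufVals, sufB_headI, ih]
      · simp [h, sufVals, ih]

theorem foldlA_eq (queries : List (List Int)) : ∀ (l : List Int) (c : Int),
    (queries.foldl
      (fun (st : List Int × Int) query =>
        if PySem.List.pyGetD query 0 0 = 0 then
          (st.1 ++ [PySem.Int.bxor (PySem.List.pyGetD query 1 0) st.2], st.2)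
        else
          (st.1, PySem.Int.bxor st.2 (PySem.List.pyGetD query 1 0)))
      (l, c)).2 = PySem.Int.bxor c (sufT queries) ∧
    (queries.foldl
      (fun (st : List Int × Int) query =>
        if PySem.List.pyGetD query 0 0 = 0 then
          (st.1 ++ [PySem.Int.bxor (PySem.List.pyGetD query 1 0) st.2], st.2)
        else
          (st.1, PySem.Int.bxor st.2 (PySem.List.pyGetD query 1 0)))
      (l, c)).1.map (fun x => PySem.Int.bxor x (PySem.Int.bxor c (sufT queries))) =
      l.map (fun x => PySem.Int.bxor x (PySem.Int.bxor c (sufT queries))) ++ sufVals queries := by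
  induction queries with
  | nil => intro l c; simp [sufT, sufVals]
  | cons query rest ih =>
      intro l c
      by_cases h : PySem.List.pyGetD query 0 0 = 0
      · have hsT : sufT (query :: rest) = sufT rest := by simp [sufT, h]
        have hsV : sufVals (query :: rest)
            = PySem.Int.bxor (PySem.List.pyGetD query 1 0) (sufT rest) :: sufVals rest := by
          simp [sufVals, h]
        obtain ⟨h2, h1⟩ := ih (l ++ [PySem.Int.bxor (PySem.List.pyGetD query 1 0) c]) c
        rw [List.foldl_cons, if_pos h]
        simp only [hsT, hsV]
        refine ⟨h2, ?_⟩
        rw [h1]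
        simp [bxor_cancel]
      · have hsT : sufT (query :: rest)
            = PySem.Int.bxor (sufT rest) (PySem.List.pyGetD query 1 0) := by simp [sufT, h]
        have hsV : sufVals (query :: rest) = sufVals rest := by simp [sufVals, h]
        obtain ⟨h2, h1⟩ := ih l (PySem.Int.bxor c (PySem.List.pyGetD query 1 0))
        have hT : PySem.Int.bxor (PySem.Int.bxor c (PySem.List.pyGetD query 1 0)) (sufT rest)
            = PySem.Int.bxor c (sufT (query :: rest)) := by
          rw [hsT, bxor_assoc, PySem.Int.bxor_comm (PySem.List.pyGetD query 1 0) (sufT rest)]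
        rw [List.foldl_cons, if_neg h]
        refine ⟨h2.trans hT, ?_⟩
        simp only [hsV, ← hT]
        exact h1

-- ===== VERDICT (by name: the statement is the Claim_ definition above) =====
theorem constructList_spec : Claim_equal_constructList := by
  intro q queries _ _
  unfold Spec_constructList constructList constructList_alt
  simp only [zipValsB, sufB_headI]
  obtain ⟨h2, h1⟩ := foldlA_eq queries [0] 0
  apply PySem.List.sorted_eq_sorted_of_perm
  · exact fun a b hab => hab
  · simp only [h2]
    rw [h1]
    have hmap : List.map (fun x => PySem.Int.bxor x (PySem.Int.bxor 0 (sufT queries))) [0]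
        ++ sufVals queries = sufT queries :: sufVals queries := by simp [bxor_zero_left]
    rw [hmap]
    exact (List.perm_append_singleton _ _).symm
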